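-- pv_equiv track=rewrite | github.com/rokuingh/dev-esmf | XMLparseESMFtickets/parseJSON2.py | remove_pending_help_tix
-- ===== SOURCE A (Python) =====
-- def remove_pending_help_tix(json):
--     json = json.splitlines(True)
--     json_mod = ""
--     buff = ""
--     duplicate = False
--     newtix = False
--     for line in json:
--         # EOF
--         if "]}" == line:
--             json_mod += buff
--             json_mod += line
--         # start of footer case
--         elif "}],\n" in line:
--             if not duplicate:
--                 json_mod += buff
--             buff = ""
--             duplicate = False
--             newtix = False
--         # new ticket, print last if it was not a duplicate, forget if it was
--         elif "},{\n" in line: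
--             if not duplicate:
--                 json_mod += buff
--             buff = ""
--             duplicate = False
--             newtix = False
--         # status = pending and "_category": "Help",
--         elif '"status": "Pending"' in line:
--             newtix = True
--         elif '"_category": "Help"' in line:
--             if newtix:
--                 duplicate = True
--         # buffer the line
--         buff += line
--
--     return json_mod
-- ===== SOURCE B (Python) =====
-- PEND = '"status": "Pending"'
-- HELP = '"_category": "Help"'
--
--
-- def _boundary(line):
--     return "}],\n" in line or "},{\n" in line
--
--
-- def _segments(lines):
--     """Split lines into segments; each boundary line starts a new segment."""
--     segs = []
--     cur = []
--     for ln in lines: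
--         if _boundary(ln):
--             segs.append(cur)
--             cur = [ln]
--         else:
--             cur.append(ln)
--     return segs, cur
--
--
-- def _dropped(seg):
--     """A segment is dropped if a Pending line precedes a Help line in it."""
--     pending = False
--     drop = False
--     for ln in seg:
--         if _boundary(ln):
--             continue
--         if PEND in ln:
--             pending = True
--         elif HELP in ln and pending:
--             drop = True
--     return drop
--
--
-- def remove_pending_help_tix(json):
--     lines = json.splitlines(True)
--     has_eof = bool(lines) and lines[-1] == "]}"
--     body = lines[:-1] if has_eof else lines
--     segs, tail = _segments(body)
--     parts = []
--     for seg in segs: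
--         if not _dropped(seg):
--             parts.extend(seg)
--     if has_eof:
--         parts.extend(tail)
--         parts.append("]}")
--     return "".join(parts)
-- ===== Notes on version B (the rewrite author's own statement) =====
-- stated objective: alternative
-- what changed: A's single pass with four mutable state variables (output, buffer, duplicate, newtix) is replaced by splitting the lines into segments at boundary lines, deciding each segment with a self-contained pending-then-help scan, and joining the kept segments (plus the unconditional ']}' tail).
import Mathlib
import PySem

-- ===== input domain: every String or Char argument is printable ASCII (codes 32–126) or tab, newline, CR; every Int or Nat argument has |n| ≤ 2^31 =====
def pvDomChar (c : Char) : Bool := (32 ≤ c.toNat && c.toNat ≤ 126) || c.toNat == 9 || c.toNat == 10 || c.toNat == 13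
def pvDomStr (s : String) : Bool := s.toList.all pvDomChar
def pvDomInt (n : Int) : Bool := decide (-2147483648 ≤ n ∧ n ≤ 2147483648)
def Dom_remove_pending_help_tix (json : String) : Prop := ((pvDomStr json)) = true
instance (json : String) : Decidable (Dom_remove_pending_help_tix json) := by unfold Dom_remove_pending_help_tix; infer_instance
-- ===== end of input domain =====

-- B replaces A's single-pass four-variable state machine by a segmentation of the lines at
-- boundary lines plus a per-segment pending-then-help scan (objective: alternative decomposition).

-- ===== PORT A =====

-- Hand port of Python `str.splitlines(keepends=True)`, shared by both ports (both Pythons call it).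
-- Exact on the stated ASCII domain, where the only line breaks are '\n', '\r' and '\r\n'.
def pvSplitlinesKeep : List Char → List Char → List (List Char)
  | acc, [] => if acc = [] then [] else [acc.reverse]
  | acc, '\r' :: '\n' :: rest => (acc.reverse ++ ['\r', '\n']) :: pvSplitlinesKeep [] rest
  | acc, '\r' :: rest => (acc.reverse ++ ['\r']) :: pvSplitlinesKeep [] rest
  | acc, '\n' :: rest => (acc.reverse ++ ['\n']) :: pvSplitlinesKeep [] rest
  | acc, c :: rest => pvSplitlinesKeep (c :: acc) rest

def pvPend : List Char := "\"status\": \"Pending\"".toList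
def pvHelp : List Char := "\"_category\": \"Help\"".toList
def pvFoot : List Char := "}],\n".toList
def pvNewt : List Char := "},{\n".toList
def pvEOF : List Char := "]}".toList

-- one iteration of A's loop; state = (json_mod, buff, duplicate, newtix)
def pvStepA (st : List Char × List Char × Bool × Bool) (line : List Char) :
    List Char × List Char × Bool × Bool :=
  if line = pvEOF then
    (st.1 ++ st.2.1 ++ line, st.2.1 ++ line, st.2.2.1, st.2.2.2)
  else if PySem.Chars.isIn pvFoot line then
    ((if st.2.2.1 then st.1 else st.1 ++ st.2.1), line, false, false)
  else if PySem.Chars.isIn pvNewt line then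
    ((if st.2.2.1 then st.1 else st.1 ++ st.2.1), line, false, false)
  else if PySem.Chars.isIn pvPend line then
    (st.1, st.2.1 ++ line, st.2.2.1, true)
  else if PySem.Chars.isIn pvHelp line then
    (st.1, st.2.1 ++ line, (if st.2.2.2 then true else st.2.2.1), st.2.2.2)
  else
    (st.1, st.2.1 ++ line, st.2.2.1, st.2.2.2)

def remove_pending_help_tix (json : String) : String :=
  let lines := pvSplitlinesKeep [] json.toList
  let st := lines.foldl pvStepA ([], [], false, false)
  String.ofList st.1

-- ===== PORT B =====

def pvBoundary (line : List Char) : Bool :=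
  PySem.Chars.isIn pvFoot line || PySem.Chars.isIn pvNewt line

-- one iteration of _segments' loop; state = (segs, cur)
def pvSegStep (st : List (List (List Char)) × List (List Char)) (ln : List Char) :
    List (List (List Char)) × List (List Char) :=
  if pvBoundary ln then (st.1 ++ [st.2], [ln]) else (st.1, st.2 ++ [ln])

def pvSegments (lines : List (List Char)) : List (List (List Char)) × List (List Char) :=
  lines.foldl pvSegStep ([], [])

-- one iteration of _dropped's loop; state = (pending, drop)
def pvScanStep (st : Bool × Bool) (ln : List Char) : Bool × Bool :=
  if pvBoundary ln then st
  else if PySem.Chars.isIn pvPend ln then (true, st.2)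
  else if PySem.Chars.isIn pvHelp ln && st.1 then (st.1, true)
  else st

def pvDropped (seg : List (List Char)) : Bool :=
  (seg.foldl pvScanStep (false, false)).2

def remove_pending_help_tix_alt (json : String) : String :=
  let lines := pvSplitlinesKeep [] json.toList
  -- `bool(lines) and lines[-1] == "]}"`
  let hasEof := lines.getLast? == some pvEOF
  let body := if hasEof then lines.dropLast else lines
  let st := pvSegments body
  let parts := st.1.foldl (fun acc seg => if !pvDropped seg then acc ++ seg else acc) []
  String.ofList (PySem.Chars.join [] (if hasEof then (parts ++ st.2) ++ [pvEOF] else parts))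

-- ===== PRECONDITION & SPEC =====
def Spec_remove_pending_help_tix (json : String) (out : String) : Prop := out = remove_pending_help_tix_alt json
instance (json : String) (out : String) : Decidable (Spec_remove_pending_help_tix json out) := by unfold Spec_remove_pending_help_tix; infer_instance

-- ===== CLAIM (what is proved, stated in full; the proofs are below) =====
def Claim_equal_remove_pending_help_tix : Prop := ∀ (json : String), Dom_remove_pending_help_tix json → Spec_remove_pending_help_tix json (remove_pending_help_tix json)

-- ===== LEMMAS AND PROOFS =====

-- A's loop body with the `"]}" == line` branch removed
def pvStepA' (st : List Char × List Char × Bool × Bool) (line : List Char) :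
    List Char × List Char × Bool × Bool :=
  if PySem.Chars.isIn pvFoot line then
    ((if st.2.2.1 then st.1 else st.1 ++ st.2.1), line, false, false)
  else if PySem.Chars.isIn pvNewt line then
    ((if st.2.2.1 then st.1 else st.1 ++ st.2.1), line, false, false)
  else if PySem.Chars.isIn pvPend line then
    (st.1, st.2.1 ++ line, st.2.2.1, true)
  else if PySem.Chars.isIn pvHelp line then
    (st.1, st.2.1 ++ line, (if st.2.2.2 then true else st.2.2.1), st.2.2.2)
  else
    (st.1, st.2.1 ++ line, st.2.2.1, st.2.2.2)

-- recursive form of pvSegments with a seed current segment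
def pvSegAux (cur : List (List Char)) : List (List Char) → List (List (List Char)) × List (List Char)
  | [] => ([], cur)
  | l :: t =>
    if pvBoundary l then ((cur :: (pvSegAux [l] t).1, (pvSegAux [l] t).2)) else pvSegAux (cur ++ [l]) t

def pvScan (seg : List (List Char)) : Bool × Bool := seg.foldl pvScanStep (false, false)

def pvRender : List (List (List Char)) → List Char
  | [] => []
  | s :: rest => (if pvDropped s then [] else s.flatten) ++ pvRender rest

def pvEndsTerm (l : List Char) : Prop := l.getLast? = some '\n' ∨ l.getLast? = some '\r'

-- every line except possibly the last ends in a line break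
def pvGood : List (List Char) → Prop
  | [] => True
  | [_] => True
  | l :: rest => pvEndsTerm l ∧ pvGood rest

theorem pvStepA_eq_stepA' (st : List Char × List Char × Bool × Bool) (l : List Char)
    (h : l ≠ pvEOF) : pvStepA st l = pvStepA' st l := by
  simp [pvStepA, pvStepA', h]

theorem pvGood_cons (l : List Char) (rest : List (List Char)) (ht : pvEndsTerm l)
    (hr : pvGood rest) : pvGood (l :: rest) := by
  cases rest with
  | nil => trivial
  | cons a t => exact ⟨ht, hr⟩

theorem pvGood_splitlines (cs acc : List Char) : pvGood (pvSplitlinesKeep acc cs) := by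
  fun_induction pvSplitlinesKeep acc cs with
  | case1 => simp [pvGood]
  | case2 => simp [pvGood]
  | case3 acc rest ih => exact pvGood_cons _ _ (by simp [pvEndsTerm]) ih
  | case4 acc rest _ ih => exact pvGood_cons _ _ (by simp [pvEndsTerm]) ih
  | case5 acc rest ih => exact pvGood_cons _ _ (by simp [pvEndsTerm]) ih
  | case6 acc c rest _ _ _ ih => exact ih

theorem pvGood_dropLast (ls : List (List Char)) (h : pvGood ls) :
    ∀ l ∈ ls.dropLast, pvEndsTerm l := by
  induction ls with
  | nil => simp
  | cons a t ih =>
    cases t with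
    | nil => simp
    | cons b u =>
      obtain ⟨ha, hrest⟩ := h
      intro l hl
      rcases List.mem_cons.mp hl with rfl | hl
      · exact ha
      · exact ih hrest l hl

theorem pvEndsTerm_ne_eof (l : List Char) (h : pvEndsTerm l) : l ≠ pvEOF := by
  intro rfl
  simp [pvEOF] at h
  rcases h with h | h <;> simp_all

theorem pvSeg_bridge (ls : List (List Char)) (segs0 : List (List (List Char)))
    (cur : List (List Char)) :
    ls.foldl pvSegStep (segs0, cur) =
      (segs0 ++ (pvSegAux cur ls).1, (pvSegAux cur ls).2) := by
  induction ls generalizing segs0 cur with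
  | nil => simp [pvSegAux]
  | cons l t ih =>
    by_cases hb : pvBoundary l
    · simp [pvSegStep, pvSegAux, hb, ih]
    · simp [pvSegStep, pvSegAux, hb, ih]

-- the central invariant: A's boundary-only loop, started mid-segment, computes B's rendering
theorem pvMain (ls : List (List Char)) (cur : List (List Char)) (mod : List Char) :
    ls.foldl pvStepA' (mod, cur.flatten, (pvScan cur).2, (pvScan cur).1) =
      (mod ++ pvRender (pvSegAux cur ls).1,
       (pvSegAux cur ls).2.flatten,
       (pvScan (pvSegAux cur ls).2).2,
       (pvScan (pvSegAux cur ls).2).1) := by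
  induction ls generalizing cur mod with
  | nil => simp [pvSegAux, pvRender]
  | cons l t ih =>
    by_cases hb : pvBoundary l
    · have hstep : pvStepA' (mod, cur.flatten, (pvScan cur).2, (pvScan cur).1) l =
          ((if (pvScan cur).2 then mod else mod ++ cur.flatten), l, false, false) := by
        by_cases hf : PySem.Chars.isIn pvFoot l
        · simp [pvStepA', hf]
        · have hn : PySem.Chars.isIn pvNewt l := by
            simp [pvBoundary, hf] at hb; exact hb
          simp [pvStepA', hf, hn]
      have hscan : pvScan [l] = (false, false) := by
        simp [pvScan, pvScanStep, hb]
      have hih := ih [l] (if (pvScan cur).2 then mod else mod ++ cur.flatten)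
      rw [List.foldl_cons, hstep]
      rw [hscan] at hih
      simp only [List.flatten_cons, List.flatten_nil, List.append_nil] at hih
      rw [hih]
      simp only [pvSegAux, hb, if_pos]
      have hdrop : pvDropped cur = (pvScan cur).2 := rfl
      simp only [pvRender, hdrop]
      by_cases hd : (pvScan cur).2 <;> simp [hd]
    · have hf : PySem.Chars.isIn pvFoot l = false := by
        simp [pvBoundary] at hb; exact hb.1
      have hn : PySem.Chars.isIn pvNewt l = false := by
        simp [pvBoundary] at hb; exact hb.2
      have hstep : pvStepA' (mod, cur.flatten, (pvScan cur).2, (pvScan cur).1) l =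
          (mod, cur.flatten ++ l, (pvScanStep (pvScan cur) l).2, (pvScanStep (pvScan cur) l).1) := by
        by_cases hp : PySem.Chars.isIn pvPend l
        · simp [pvStepA', pvScanStep, hf, hn, hp, hb]
        · by_cases hh : PySem.Chars.isIn pvHelp l
          · by_cases hnew : (pvScan cur).1 <;>
              simp [pvStepA', pvScanStep, hf, hn, hp, hh, hb, hnew]
          · simp [pvStepA', pvScanStep, hf, hn, hp, hh, hb]
      have hflat : (cur ++ [l]).flatten = cur.flatten ++ l := by simp
      have hscan : pvScan (cur ++ [l]) = pvScanStep (pvScan cur) l := by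
        simp [pvScan, List.foldl_append]
      have hih := ih (cur ++ [l]) mod
      rw [hflat, hscan] at hih
      rw [List.foldl_cons, hstep, hih]
      simp only [pvSegAux, hb, if_neg, Bool.false_eq_true, not_false_iff]

theorem pvJoin_nil (parts : List (List Char)) : PySem.Chars.join [] parts = parts.flatten := by
  simp only [PySem.Chars.join, List.intercalate]
  induction parts with
  | nil => rfl
  | cons a t ih =>
    cases t with
    | nil => rfl
    | cons b u => simp_all [List.intersperse]

theorem pvParts_flatten (segs : List (List (List Char))) (acc : List (List Char)) :
    (segs.foldl (fun acc seg => if !pvDropped seg then acc ++ seg else acc) acc).flatten =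
      acc.flatten ++ pvRender segs := by
  induction segs generalizing acc with
  | nil => simp [pvRender]
  | cons s t ih =>
    by_cases hd : pvDropped s
    · simpa [pvRender, hd] using ih acc
    · simpa [pvRender, hd, List.append_assoc] using ih (acc ++ s)

theorem pvTerm (ls : List (List Char)) (hg : pvGood ls) : ∀ l ∈ ls.dropLast, l ≠ pvEOF :=
  fun l hl => pvEndsTerm_ne_eof l (pvGood_dropLast ls hg l hl)

-- the whole claim when the last line is exactly "]}"
theorem pvTopEof (ls : List (List Char)) (hg : pvGood ls) (he : ls.getLast? = some pvEOF) :
    (ls.foldl pvStepA ([], [], false, false)).1 =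
      PySem.Chars.join []
        ((((pvSegments ls.dropLast).1.foldl
             (fun acc seg => if !pvDropped seg then acc ++ seg else acc) []) ++
          (pvSegments ls.dropLast).2) ++ [pvEOF]) := by
  have hterm : ∀ l ∈ ls.dropLast, l ≠ pvEOF := pvTerm ls hg
  have hne : ls ≠ [] := by intro h; rw [h] at he; simp at he
  have hsplit : ls = ls.dropLast ++ [pvEOF] := by
    conv_lhs => rw [← List.dropLast_append_getLast hne]
    have : ls.getLast hne = pvEOF := by
      have := List.getLast?_eq_some_getLast (l := ls) hne
      rw [this] at he; exact Option.some.inj he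
    rw [this]
  have hA : ls.foldl pvStepA ([], [], false, false) =
      pvStepA (ls.dropLast.foldl pvStepA ([], [], false, false)) pvEOF := by
    conv_lhs => rw [hsplit]
    rw [List.foldl_append]; rfl
  have hcongr : ls.dropLast.foldl pvStepA ([], [], false, false) =
      ls.dropLast.foldl pvStepA' ([], [], false, false) := by
    exact PySem.List.foldl_congr_mem _ _ _ _ (fun acc x hx => pvStepA_eq_stepA' acc x (hterm x hx))
  have hmain := pvMain ls.dropLast [] []
  simp only [List.flatten_nil] at hmain
  have hscan0 : pvScan ([] : List (List Char)) = (false, false) := rfl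
  rw [hscan0] at hmain
  simp only [List.nil_append] at hmain
  have hseg := pvSeg_bridge ls.dropLast [] []
  simp only [List.nil_append] at hseg
  rw [pvJoin_nil]
  rw [hA, hcongr, hmain]
  simp only [pvStepA, pvSegments, hseg]
  rw [List.flatten_append, List.flatten_append]
  rw [pvParts_flatten]
  simp

-- the whole claim when no line is "]}"
theorem pvTopNoEof (ls : List (List Char)) (hg : pvGood ls) (he : ¬ ls.getLast? = some pvEOF) :
    (ls.foldl pvStepA ([], [], false, false)).1 =
      PySem.Chars.join []
        ((pvSegments ls).1.foldl
           (fun acc seg => if !pvDropped seg then acc ++ seg else acc) []) := by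
  have hterm : ∀ l ∈ ls.dropLast, l ≠ pvEOF := pvTerm ls hg
  have hnoeof : ∀ l ∈ ls, l ≠ pvEOF := by
      intro l hl
      by_cases hnil : ls = []
      · subst hnil; simp at hl
      · rw [← List.dropLast_append_getLast hnil] at hl
        rcases List.mem_append.mp hl with h | h
        · exact hterm l h
        · have : l = ls.getLast hnil := by simpa using h
          intro hctr
          apply he
          rw [List.getLast?_eq_some_getLast (l := ls) hnil, ← this, hctr]
  have hcongr : ls.foldl pvStepA ([], [], false, false) =
      ls.foldl pvStepA' ([], [], false, false) := by
    exact PySem.List.foldl_congr_mem _ _ _ _ (fun acc x hx => pvStepA_eq_stepA' acc x (hnoeof x hx))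
  have hmain := pvMain ls [] []
  simp only [List.flatten_nil] at hmain
  have hscan0 : pvScan ([] : List (List Char)) = (false, false) := rfl
  rw [hscan0] at hmain
  simp only [List.nil_append] at hmain
  have hseg := pvSeg_bridge ls [] []
  simp only [List.nil_append] at hseg
  rw [pvJoin_nil]
  rw [hcongr, hmain]
  simp only [pvSegments, hseg]
  rw [pvParts_flatten]
  simp

-- ===== VERDICT (by name: the statement is the Claim_ definition above) =====
theorem remove_pending_help_tix_spec : Claim_equal_remove_pending_help_tix := by
  intro json _
  unfold Spec_remove_pending_help_tix remove_pending_help_tix remove_pending_help_tix_alt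
  by_cases he : (pvSplitlinesKeep [] json.toList).getLast? = some pvEOF
  · simp only [show ((pvSplitlinesKeep [] json.toList).getLast? == some pvEOF) = true by
      simp [he], if_pos]
    exact congrArg String.ofList (pvTopEof _ (pvGood_splitlines json.toList []) he)
  · simp only [show ((pvSplitlinesKeep [] json.toList).getLast? == some pvEOF) = false by
      simp [he], Bool.false_eq_true, if_false]
    exact congrArg String.ofList (pvTopNoEof _ (pvGood_splitlines json.toList []) he)
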